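-- pv_equiv track=rewrite | github.com/iknoom/Problem_Solving | CodeJam/2021/Round1 A/A.py | solution
-- ===== SOURCE A (Python) =====
-- def solution(N, X):
--     ret = 0
--     for i in range(1, N):
--         if X[i - 1] < X[i]:
--             continue
--         if len(str(X[i - 1])) == len(str(X[i])):
--             X[i] *= 10
--             ret += 1
--             continue
--         strY = str(X[i])
--         strX = str(X[i - 1])
--         preX = strX[:len(strY)]
--         suX = strX[len(strY):]
--         if preX == strY and len(suX) >= len(str(int(suX) + 1)):
--             ret += len(suX)
--             X[i] = X[i - 1] + 1
--         else:
--             while X[i - 1] >= X[i]: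
--                 ret += 1
--                 X[i] *= 10
--     return ret
-- ===== SOURCE B (Python) =====
-- def solution(N, X):
--     # One uniform arithmetic search per position instead of A's three string-based
--     # branches: the smallest number d of appended digits such that even the largest
--     # d-digit extension of X[i] (i.e. X[i]*10**d + 10**d - 1) exceeds X[i-1].
--     # Mutates X[i] in place exactly like A (same values on the stated domain).
--     ret = 0
--     for i in range(1, N):
--         prev, cur = X[i - 1], X[i]
--         if prev < cur:
--             continue
--         d = 1
--         while cur * 10 ** d + 10 ** d - 1 <= prev:
--             d += 1
--         X[i] = max(cur * 10 ** d, prev + 1)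
--         ret += d
--     return ret
-- ===== Notes on version B (the rewrite author's own statement) =====
-- stated objective: simpler
-- what changed: A's three string-based branches (equal str-length, decimal-prefix match with carry test, and a multiply-by-10 while loop) are collapsed into one purely arithmetic search for the least number d of appended digits whose maximal extension X[i]*10^d + 10^d - 1 beats the predecessor, then X[i] = max(X[i]*10^d, X[i-1]+1); no string conversion at all.
-- outside the precondition, e.g. on solution(2, [-5, -7]): A returns 1, B does not finish within the time limit; on solution(3, [5, 0, 5]): A returns 1, B returns 2; on solution(2, [0, 0]): A returns 1, B returns 1
import Mathlib
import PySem

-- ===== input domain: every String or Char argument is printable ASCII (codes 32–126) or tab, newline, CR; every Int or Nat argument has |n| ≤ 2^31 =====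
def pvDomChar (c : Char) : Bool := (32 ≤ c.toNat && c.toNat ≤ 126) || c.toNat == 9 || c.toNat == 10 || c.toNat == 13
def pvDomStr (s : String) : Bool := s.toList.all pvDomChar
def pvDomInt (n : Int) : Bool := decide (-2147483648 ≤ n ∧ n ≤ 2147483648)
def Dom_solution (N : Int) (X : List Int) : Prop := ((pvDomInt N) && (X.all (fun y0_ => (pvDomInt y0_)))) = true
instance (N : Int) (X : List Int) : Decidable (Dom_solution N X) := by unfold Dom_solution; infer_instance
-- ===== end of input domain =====

-- B replaces A's three string-based branches by one arithmetic search for the number of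
-- appended digits (objective: simpler).  Both A and B mutate X[i] in place identically on
-- Pre_; the equivalence proved here is about the return value.

-- ===== PORT A =====

-- A's inner `while X[i-1] >= X[i]: ret += 1; X[i] *= 10`; returns (final X[i], ret).
-- The extra `1 ≤ cur` in the guard only makes the recursion total: on non-positive cur
-- (excluded by Pre_solution) the Python loop never terminates.
def awhile (prev cur ret : Int) : Int × Int :=
  if h : cur ≤ prev ∧ 1 ≤ cur then awhile prev (cur * 10) (ret + 1) else (cur, ret)
  termination_by (prev + 1 - cur).toNat
  decreasing_by
    obtain ⟨h1, h2⟩ := h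
    omega

-- hand port of Python `int(s)` for the argument shape reachable here: s is a slice
-- str(X[i-1])[k:], k ≥ 1, of a decimal representation, hence int() returns normally exactly
-- when s is nonempty and all digits, with the usual decimal value (exact on that shape;
-- PySem.Int.ofChars? computes the same values but its digit parser is a private definition
-- that proofs cannot unfold).
def pyIntOfDigits? (cs : List Char) : Option Int :=
  if cs ≠ [] ∧ cs.all Char.isDigit then
    some (cs.foldl (fun a c => a * 10 + ((c.toNat : Int) - 48)) 0)
  else none

-- body of A's loop for the case X[i-1] >= X[i]; returns (new X[i], new ret).
-- Python's locals strY = str(X[i]), strX = str(X[i-1]), preX = strX[:len(strY)],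
-- suX = strX[len(strY):] are inlined (each occurrence written out).
def stepA (prev cur ret : Int) : Int × Int :=
  if (PySem.Int.toChars prev).length = (PySem.Int.toChars cur).length then
    (cur * 10, ret + 1)
  else if PySem.List.slice (PySem.Int.toChars prev) none
            (some ((PySem.Int.toChars cur).length : Int)) = PySem.Int.toChars cur
        ∧ ((pyIntOfDigits? (PySem.List.slice (PySem.Int.toChars prev)
              (some ((PySem.Int.toChars cur).length : Int)) none)).any
            (fun s => decide ((PySem.Int.toChars (s + 1)).length
              ≤ (PySem.List.slice (PySem.Int.toChars prev)
                  (some ((PySem.Int.toChars cur).length : Int)) none).length))) = true then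
    (prev + 1, ret + ((PySem.List.slice (PySem.Int.toChars prev)
        (some ((PySem.Int.toChars cur).length : Int)) none).length : Int))
  else
    awhile prev cur ret

def loopA (st : List Int × Int) (i : Int) : List Int × Int :=
  match PySem.List.pyGet? st.1 (i - 1), PySem.List.pyGet? st.1 i with
  | some prev, some cur =>
      if prev < cur then st
      else
        let vr := stepA prev cur st.2
        (PySem.List.pySetD st.1 i vr.1, vr.2)
  | _, _ => st   -- Python raises IndexError here; excluded by Pre_solution

def solution (N : Int) (X : List Int) : Int :=
  ((PySem.List.pyRange 1 N 1).foldl loopA (X, 0)).2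

-- ===== PORT B =====

-- B's `while cur * 10**d + 10**d - 1 <= prev: d += 1`.  The extra `0 ≤ cur` in the guard
-- only makes the recursion total: on negative cur (excluded by Pre_solution) B's Python
-- loop never terminates.
def searchD (prev cur : Int) (d : Nat) : Nat :=
  if h : cur * 10 ^ d + 10 ^ d - 1 ≤ prev ∧ 0 ≤ cur then searchD prev cur (d + 1) else d
  termination_by (prev + 2 - 10 ^ d).toNat
  decreasing_by
    obtain ⟨h1, h2⟩ := h
    have e1 : (10:Int) ^ (d + 1) = 10 ^ d * 10 := pow_succ 10 d
    have e2 : (1:Int) ≤ 10 ^ d := one_le_pow₀ (by omega)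
    have e3 : (0:Int) ≤ cur * 10 ^ d := mul_nonneg h2 (by omega)
    omega

def stepB (prev cur ret : Int) : Int × Int :=
  (max (cur * 10 ^ searchD prev cur 1) (prev + 1), ret + ((searchD prev cur 1 : Nat) : Int))

def loopB (st : List Int × Int) (i : Int) : List Int × Int :=
  match PySem.List.pyGet? st.1 (i - 1), PySem.List.pyGet? st.1 i with
  | some prev, some cur =>
      if prev < cur then st
      else
        let vr := stepB prev cur st.2
        (PySem.List.pySetD st.1 i vr.1, vr.2)
  | _, _ => st   -- Python raises IndexError here; excluded by Pre_solution

def solution_alt (N : Int) (X : List Int) : Int :=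
  ((PySem.List.pyRange 1 N 1).foldl loopB (X, 0)).2

-- ===== PRECONDITION & SPEC =====

-- Pre_ excludes (a) inputs where A raises IndexError (2 ≤ N but X shorter than N), and
-- (b) inputs with an adjacent non-increasing pair among the first N elements having some
-- member ≤ 0: there "appending decimal digits" is meaningless and A either loops forever
-- (e.g. (2, [5, -3])) or returns accidental values of its *10 fallback on which B's digit
-- search diverges or differs (e.g. A returns 1 on (2, [-5, -7]) where B diverges).
def Pre_solution (N : Int) (X : List Int) : Prop :=
  (N ≤ (X.length : Int) ∨ N ≤ 1) ∧
  ∀ i : Nat, i < N.toNat → 1 ≤ i →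
    (X.getD (i - 1) 0 < X.getD i 0 ∨ (1 ≤ X.getD (i - 1) 0 ∧ 1 ≤ X.getD i 0))

instance (N : Int) (X : List Int) : Decidable (Pre_solution N X) := by
  unfold Pre_solution; infer_instance

def pvWitness_solution : Int × List Int := (3, [2, 1, 15])

def Spec_solution (N : Int) (X : List Int) (out : Int) : Prop := out = solution_alt N X
instance (N : Int) (X : List Int) (out : Int) : Decidable (Spec_solution N X out) := by
  unfold Spec_solution; infer_instance

-- ===== CLAIM (what is proved, stated in full; the proofs are below) =====
def Claim_equal_solution : Prop :=
  ∀ (N : Int) (X : List Int), Dom_solution N X → Pre_solution N X →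
    Spec_solution N X (solution N X)

-- ===== LEMMAS AND PROOFS =====

-- ---- the two inner loops, characterised ----

theorem awhile_eq : ∀ (k : Nat) (prev cur ret : Int), 1 ≤ k → 1 ≤ cur →
    (∀ e : Nat, e < k → cur * 10 ^ e ≤ prev) → prev < cur * 10 ^ k →
    awhile prev cur ret = (cur * 10 ^ k, ret + (k : Int)) := by
  intro k
  induction k with
  | zero => intro _ _ _ h; omega
  | succ k ih =>
    intro prev cur ret _ hcur hle hgt
    have h0 : cur ≤ prev := by have := hle 0 (by omega); simpa using this
    rw [awhile, dif_pos ⟨h0, hcur⟩]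
    by_cases hk : k = 0
    · subst hk
      rw [awhile, dif_neg (by
        rintro ⟨hc, -⟩
        have h1 : cur * 10 ^ (0 + 1) = cur * 10 := by ring
        omega)]
      have h2 : cur * 10 ^ (0 + 1) = cur * 10 := by ring
      rw [h2]
      norm_num
    · have hres := ih prev (cur * 10) (ret + 1) (by omega) (by omega)
        (fun e he => by
          have h2 := hle (e + 1) (by omega)
          calc cur * 10 * 10 ^ e = cur * 10 ^ (e + 1) := by ring
          _ ≤ prev := h2)
        (by calc prev < cur * 10 ^ (k + 1) := hgt
            _ = cur * 10 * 10 ^ k := by ring)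
      rw [hres]
      simp only [Prod.mk.injEq]
      refine ⟨by ring, by push_cast; ring⟩

theorem searchD_eq (prev cur : Int) (k : Nat) (hcur : 0 ≤ cur)
    (hnk : ¬ (cur * 10 ^ k + 10 ^ k - 1 ≤ prev)) :
    ∀ (m j : Nat), j + m = k →
    (∀ e : Nat, j ≤ e → e < k → cur * 10 ^ e + 10 ^ e - 1 ≤ prev) →
    searchD prev cur j = k := by
  intro m
  induction m with
  | zero =>
    intro j hj _
    have hjk : j = k := by omega
    subst hjk
    rw [searchD, dif_neg]
    rintro ⟨h1, -⟩; exact hnk h1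
  | succ m ih =>
    intro j hj hle
    have hcond : cur * 10 ^ j + 10 ^ j - 1 ≤ prev := hle j (le_refl j) (by omega)
    rw [searchD, dif_pos ⟨hcond, hcur⟩]
    exact ih (j + 1) (by omega) (fun e he1 he2 => hle e (by omega) he2)

-- ---- decimal-string characterisation ----

theorem toChars_nonneg (x : Int) (h : 0 ≤ x) :
    PySem.Int.toChars x = Nat.toDigits 10 x.toNat := by
  simp only [PySem.Int.toChars, if_neg (by omega : ¬ x < 0)]

theorem toDigitsCore_eq : ∀ (f n : Nat) (l : List Char), n ≠ 0 → n ≤ f →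
    Nat.toDigitsCore 10 f n l = ((Nat.digits 10 n).map Nat.digitChar).reverse ++ l := by
  intro f
  induction f with
  | zero => intro n l hn hf; omega
  | succ f ih =>
    intro n l hn hf
    rw [Nat.toDigitsCore]
    by_cases h : n / 10 = 0
    · have hlt : n < 10 := by omega
      rw [if_pos h, Nat.digits_def' (by norm_num : 1 < 10) (by omega), h]
      simp
    · rw [if_neg h]
      have hdiv : n / 10 < n := Nat.div_lt_self (by omega) (by norm_num)
      rw [ih (n / 10) (Nat.digitChar (n % 10) :: l) h (by omega)]
      rw [Nat.digits_def' (by norm_num : 1 < 10) (show 0 < n by omega)]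
      simp

theorem toDigits_eq (n : Nat) (hn : n ≠ 0) :
    Nat.toDigits 10 n = ((Nat.digits 10 n).map Nat.digitChar).reverse := by
  rw [Nat.toDigits, toDigitsCore_eq (n + 1) n [] hn (by omega)]
  simp

theorem digits_bracket (n : Nat) (hn : n ≠ 0) :
    10 ^ ((Nat.digits 10 n).length - 1) ≤ n ∧ n < 10 ^ (Nat.digits 10 n).length ∧
      1 ≤ (Nat.digits 10 n).length := by
  have hlen : (Nat.digits 10 n).length = Nat.log 10 n + 1 :=
    Nat.digits_len 10 n (by norm_num) hn
  refine ⟨?_, ?_, by omega⟩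
  · rw [hlen]; simpa using Nat.pow_log_le_self 10 hn
  · rw [hlen]; exact Nat.lt_pow_succ_log_self (by norm_num) n

theorem digits_len_mono {a b : Nat} (h : a ≤ b) :
    (Nat.digits 10 a).length ≤ (Nat.digits 10 b).length := by
  by_cases ha : a = 0
  · simp [ha]
  · have hb : b ≠ 0 := by omega
    rw [Nat.digits_len 10 a (by norm_num) ha, Nat.digits_len 10 b (by norm_num) hb]
    have := Nat.log_mono_right (b := 10) h
    omega

theorem digits_div_pow (p : Nat) : ∀ (d : Nat), d ≤ (Nat.digits 10 p).length →
    Nat.digits 10 (p / 10 ^ d) = (Nat.digits 10 p).drop d := by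
  intro d
  induction d with
  | zero => intro _; simp
  | succ d ih =>
    intro hd
    have h1 : Nat.digits 10 (p / 10 ^ d) = (Nat.digits 10 p).drop d := ih (by omega)
    have hne : p / 10 ^ d ≠ 0 := by
      intro h0
      have h2 : (Nat.digits 10 p).drop d = [] := by rw [← h1, h0]; simp
      rw [List.drop_eq_nil_iff] at h2
      omega
    have hsp : p / 10 ^ (d + 1) = p / 10 ^ d / 10 := by
      rw [pow_succ, ← Nat.div_div_eq_div_mul]
    have hdef := Nat.digits_def' (by norm_num : 1 < 10) (Nat.pos_of_ne_zero hne)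
    have h3 : Nat.digits 10 (p / 10 ^ d / 10) = ((Nat.digits 10 p).drop d).tail := by
      rw [← h1, hdef]
      rfl
    rw [hsp, h3, List.tail_drop]

    

theorem dc_val (a : Nat) (h : a < 10) : (Nat.digitChar a).toNat = a + 48 := by
  interval_cases a <;> rfl

theorem dc_isDigit (a : Nat) (h : a < 10) : (Nat.digitChar a).isDigit = true := by
  interval_cases a <;> rfl

theorem map_dc_inj : ∀ (ds es : List Nat), (∀ a ∈ ds, a < 10) → (∀ a ∈ es, a < 10) →
    ds.map Nat.digitChar = es.map Nat.digitChar → ds = es := by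
  intro ds
  induction ds with
  | nil => intro es _ _ h; cases es <;> simp_all
  | cons a ds ih =>
    intro es hds hes h
    cases es with
    | nil => simp at h
    | cons b es =>
      simp only [List.map_cons, List.cons.injEq] at h
      have ha : a < 10 := hds a (by simp)
      have hb : b < 10 := hes b (by simp)
      have hab : a = b := by
        have := congrArg Char.toNat h.1
        rw [dc_val a ha, dc_val b hb] at this
        omega
      exact by
        rw [hab, ih es (fun x hx => hds x (by simp [hx])) (fun x hx => hes x (by simp [hx])) h.2]

theorem rev_take {α : Type} (l : List α) (n : Nat) (h : n ≤ l.length) :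
    l.reverse.take n = (l.drop (l.length - n)).reverse := by
  conv_lhs => rw [← List.take_append_drop (l.length - n) l, List.reverse_append]
  rw [List.take_left']
  simp
  omega

theorem rev_drop {α : Type} (l : List α) (n : Nat) (h : n ≤ l.length) :
    l.reverse.drop n = (l.take (l.length - n)).reverse := by
  conv_lhs => rw [← List.take_append_drop (l.length - n) l, List.reverse_append]
  rw [List.drop_left']
  simp
  omega

theorem parse_fold : ∀ (ds : List Nat), (∀ a ∈ ds, a < 10) → ∀ (acc : Int),
    ((ds.map Nat.digitChar).reverse).foldl (fun a c => a * 10 + ((c.toNat : Int) - 48)) acc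
      = acc * 10 ^ ds.length + ((Nat.ofDigits 10 ds : Nat) : Int) := by
  intro ds
  induction ds with
  | nil => intro _ acc; simp [Nat.ofDigits]
  | cons a ds ih =>
    intro hlt acc
    have ha : a < 10 := hlt a (by simp)
    rw [List.map_cons, List.reverse_cons, List.foldl_append]
    rw [ih (fun x hx => hlt x (by simp [hx])) acc]
    simp only [List.foldl_cons, List.foldl_nil, Nat.ofDigits_cons, List.length_cons]
    rw [dc_val a ha]
    push_cast
    ring

theorem parse_digits (ds : List Nat) (h : ∀ a ∈ ds, a < 10) (hne : ds ≠ []) :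
    pyIntOfDigits? ((ds.map Nat.digitChar).reverse)
      = some ((Nat.ofDigits 10 ds : Nat) : Int) := by
  rw [pyIntOfDigits?, if_pos]
  · rw [parse_fold ds h 0]
    simp
  · constructor
    · simp [hne]
    · rw [List.all_eq_true]
      intro c hc
      simp only [List.mem_reverse, List.mem_map] at hc
      obtain ⟨a, ha, rfl⟩ := hc
      exact dc_isDigit a (h a ha)

-- ---- the two step functions agree on positive non-increasing pairs ----

theorem stepAB (prev cur ret : Int) (hcur : 1 ≤ cur) (hle : cur ≤ prev) :
    stepA prev cur ret = stepB prev cur ret := by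
  have hprev : 1 ≤ prev := le_trans hcur hle
  set p := prev.toNat with hpdef
  set c := cur.toNat with hcdef
  have hpI : prev = (p : Int) := by omega
  have hcI : cur = (c : Int) := by omega
  have hp0 : p ≠ 0 := by omega
  have hc0 : c ≠ 0 := by omega
  have hcp : c ≤ p := by omega
  obtain ⟨hplo, hphi, hpL1⟩ := digits_bracket p hp0
  obtain ⟨hclo, hchi, hcL1⟩ := digits_bracket c hc0
  set ds := Nat.digits 10 p with hdsdef
  set Lp := (Nat.digits 10 p).length with hLpdef
  set Lc := (Nat.digits 10 c).length with hLcdef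
  have hdsl : ds.length = Lp := by rw [hdsdef]
  have hmono : Lc ≤ Lp := digits_len_mono hcp
  have htp : PySem.Int.toChars prev = (ds.map Nat.digitChar).reverse := by
    rw [toChars_nonneg prev (by omega), ← hpdef, toDigits_eq p hp0]
  have htc : PySem.Int.toChars cur = ((Nat.digits 10 c).map Nat.digitChar).reverse := by
    rw [toChars_nonneg cur (by omega), ← hcdef, toDigits_eq c hc0]
  have hlenp : (PySem.Int.toChars prev).length = Lp := by simp [htp, hdsl]
  have hlenc : (PySem.Int.toChars cur).length = Lc := by simp [htc, hLcdef]
  unfold stepA stepB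
  by_cases hL : Lp = Lc
  · -- equal string lengths: A multiplies by 10 once, B finds d = 1
    have hkey : p + 1 ≤ 10 * c := by
      have h1 : (10:Nat) ^ Lc ≤ 10 * c := by
        have h2 : Lc - 1 + 1 = Lc := by omega
        calc (10:Nat) ^ Lc = 10 ^ (Lc - 1 + 1) := by rw [h2]
          _ = 10 ^ (Lc - 1) * 10 := pow_succ 10 (Lc - 1)
          _ ≤ c * 10 := Nat.mul_le_mul_right 10 hclo
          _ = 10 * c := by ring
      have h3 : p < 10 ^ Lc := by rw [← hL]; exact hphi
      omega
    have hkeyI : prev + 1 ≤ 10 * cur := by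
      have h4 : ((p : Nat) : Int) + 1 ≤ 10 * ((c : Nat) : Int) := by exact_mod_cast hkey
      omega
    have hd1 : searchD prev cur 1 = 1 := by
      refine searchD_eq prev cur 1 (by omega) ?_ 0 1 rfl (fun e he1 he2 => by omega)
      intro hcond
      rw [pow_one] at hcond
      omega
    rw [if_pos (by rw [hlenp, hlenc, hL]), hd1]
    have hmax : max (cur * 10 ^ 1) (prev + 1) = cur * 10 := by
      rw [pow_one]
      exact max_eq_left (by omega)
    rw [hmax]
    norm_num
  · -- different string lengths
    have hLlt : Lc < Lp := by omega
    set D := Lp - Lc with hDdef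
    have hD1 : 1 ≤ D := by omega
    have hLpeq : Lp = Lc + D := by omega
    have hdrop : Nat.digits 10 (p / 10 ^ D) = ds.drop D := digits_div_pow p D (by omega)
    have hpreX : PySem.List.slice (PySem.Int.toChars prev) none
        (some ((PySem.Int.toChars cur).length : Int))
        = ((ds.drop D).map Nat.digitChar).reverse := by
      rw [hlenc, PySem.List.slice_to_natCast, htp,
        rev_take (ds.map Nat.digitChar) Lc (by simp [hdsl]; omega)]
      simp [hdsl, ← hDdef]
    have hsuX : PySem.List.slice (PySem.Int.toChars prev)
        (some ((PySem.Int.toChars cur).length : Int)) none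
        = ((ds.take D).map Nat.digitChar).reverse := by
      rw [hlenc, PySem.List.slice_from_natCast, htp,
        rev_drop (ds.map Nat.digitChar) Lc (by simp [hdsl]; omega)]
      simp [hdsl, ← hDdef]
    have hsulen : (((ds.take D).map Nat.digitChar).reverse).length = D := by
      simp [hdsl]
      omega
    set s := p % 10 ^ D with hsdef
    have hofd : Nat.ofDigits 10 (ds.take D) = s :=
      (Nat.self_mod_pow_eq_ofDigits_take D p (by norm_num)).symm
    have htake_ne : ds.take D ≠ [] := by
      intro h0
      have hh := congrArg List.length h0
      simp [hdsl] at hh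
      omega
    have hsval : pyIntOfDigits? (((ds.take D).map Nat.digitChar).reverse)
        = some ((s : Nat) : Int) := by
      rw [parse_digits (ds.take D)
        (fun a ha => Nat.digits_lt_base (by norm_num) (List.mem_of_mem_take ha)) htake_ne, hofd]
    have hslt : s < 10 ^ D := Nat.mod_lt p (by positivity)
    have hs10 : ((s:Int) + 1).toNat = s + 1 := by omega
    have htoS : PySem.Int.toChars ((s:Int) + 1)
        = ((Nat.digits 10 (s+1)).map Nat.digitChar).reverse := by
      rw [toChars_nonneg _ (by omega), hs10, toDigits_eq (s+1) (by omega)]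
    have hcond2 : ((PySem.Int.toChars ((s:Int) + 1)).length ≤ D) ↔ s + 1 < 10 ^ D := by
      obtain ⟨blo, bhi, b1⟩ := digits_bracket (s+1) (by omega)
      rw [htoS]
      simp only [List.length_reverse, List.length_map]
      constructor
      · intro h
        exact lt_of_lt_of_le bhi (Nat.pow_le_pow_right (by norm_num) h)
      · intro h
        by_contra hcn
        have h6 : (10:Nat) ^ D ≤ 10 ^ ((Nat.digits 10 (s+1)).length - 1) :=
          Nat.pow_le_pow_right (by norm_num) (by omega)
        omega
    have hchain : ∀ e : Nat, e < D → c * 10 ^ e + 10 ^ e ≤ p := by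
      intro e he
      calc c * 10 ^ e + 10 ^ e = (c + 1) * 10 ^ e := by ring
        _ ≤ 10 ^ Lc * 10 ^ e := Nat.mul_le_mul_right _ (by omega)
        _ = 10 ^ (Lc + e) := (pow_add 10 Lc e).symm
        _ ≤ 10 ^ (Lp - 1) := Nat.pow_le_pow_right (by norm_num) (by omega)
        _ ≤ p := hplo
    have hIchain : ∀ e : Nat, 1 ≤ e → e < D → cur * (10:Int) ^ e + 10 ^ e - 1 ≤ prev := by
      intro e h1 h2
      have hNI : ((c * 10 ^ e + 10 ^ e : Nat) : Int) ≤ ((p : Nat) : Int) := by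
        exact_mod_cast hchain e h2
      push_cast at hNI
      rw [hpI, hcI]
      linarith
    have honeD : (1:Int) ≤ (10:Int) ^ D := one_le_pow₀ (by norm_num)
    have hprefix_iff : (((ds.drop D).map Nat.digitChar).reverse = PySem.Int.toChars cur)
        ↔ p / 10 ^ D = c := by
      rw [htc]
      constructor
      · intro h
        have h2 := map_dc_inj (ds.drop D) (Nat.digits 10 c)
          (fun a ha => Nat.digits_lt_base (by norm_num) (List.mem_of_mem_drop ha))
          (fun a ha => Nat.digits_lt_base (by norm_num) ha)
          (List.reverse_injective h)
        have h3 : Nat.digits 10 (p / 10 ^ D) = Nat.digits 10 c := by rw [hdrop, h2]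
        exact Nat.digits.injective 10 h3
      · intro h
        rw [← hdrop, h]
    rw [if_neg (show ¬ (PySem.Int.toChars prev).length = (PySem.Int.toChars cur).length by
      rw [hlenp, hlenc]; exact hL)]
    simp only [hpreX, hsuX, hsval, Option.any_some, decide_eq_true_eq, hsulen]
    by_cases hmain : p / 10 ^ D = c ∧ s + 1 < 10 ^ D
    · -- A's decimal-prefix branch; B finds d = D and takes prev + 1
      have hps : p = c * 10 ^ D + s := by
        conv_lhs => rw [← Nat.div_add_mod p (10 ^ D)]
        rw [hmain.1, ← hsdef]
        ring
      have hpsI : ((p : Nat) : Int) = ((c : Nat) : Int) * (10:Int) ^ D + ((s : Nat) : Int) := by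
        exact_mod_cast hps
      have hs2I : ((s : Nat) : Int) + 1 < (10:Int) ^ D := by exact_mod_cast hmain.2
      have hsnnI : (0:Int) ≤ ((s : Nat) : Int) := by positivity
      have hnkD : ¬ (cur * (10:Int) ^ D + 10 ^ D - 1 ≤ prev) := by
        intro hcond
        rw [hpI, hcI] at hcond
        linarith
      have hdD : searchD prev cur 1 = D := by
        exact searchD_eq prev cur D (by omega) hnkD (D - 1) 1 (by omega)
          (fun e he1 he2 => hIchain e he1 he2)
      have hdcg : ds.drop D = Nat.digits 10 c := by rw [← hdrop, hmain.1]
      rw [if_pos ⟨by rw [hdcg, htc], hcond2.mpr hmain.2⟩, hdD]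
      have hmax : max (cur * (10:Int) ^ D) (prev + 1) = prev + 1 := by
        apply max_eq_right
        rw [hpI, hcI]
        linarith
      rw [hmax]
    · -- A's while-loop branch; B finds the same d
      have hnotc : ¬ ((((ds.drop D).map Nat.digitChar).reverse = PySem.Int.toChars cur)
          ∧ (PySem.Int.toChars ((s : Nat) + 1 : Int)).length ≤ D) := by
        rintro ⟨hA, hB⟩
        exact hmain ⟨hprefix_iff.mp hA, hcond2.mp (by exact_mod_cast hB)⟩
      rw [if_neg (by push_cast at hnotc ⊢; exact hnotc)]
      by_cases hgtD : p < c * 10 ^ D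
      · -- d = D, new value cur * 10^D
        have hgtI : prev < cur * (10:Int) ^ D := by
          have h1 : ((p : Nat) : Int) < ((c * 10 ^ D : Nat) : Int) := by exact_mod_cast hgtD
          rw [hpI, hcI]
          push_cast at h1 ⊢
          linarith
        have hnkD : ¬ (cur * (10:Int) ^ D + 10 ^ D - 1 ≤ prev) := by
          intro hcond
          linarith
        have hdD : searchD prev cur 1 = D := by
          exact searchD_eq prev cur D (by omega) hnkD (D - 1) 1 (by omega)
            (fun e he1 he2 => hIchain e he1 he2)
        have hwh : awhile prev cur ret = (cur * 10 ^ D, ret + (D : Int)) := by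
          refine awhile_eq D prev cur ret hD1 hcur ?_ hgtI
          intro e he
          by_cases he0 : e = 0
          · subst he0; simpa using hle
          · have hNI : ((c * 10 ^ e + 10 ^ e : Nat) : Int) ≤ ((p : Nat) : Int) := by
              exact_mod_cast hchain e he
            push_cast at hNI
            have hpe : (0:Int) ≤ (10:Int) ^ e := by positivity
            rw [hpI, hcI]
            linarith
        rw [hwh, hdD]
        have hmax : max (cur * (10:Int) ^ D) (prev + 1) = cur * 10 ^ D :=
          max_eq_left (by linarith)
        rw [hmax]
      · -- d = D + 1, new value cur * 10^(D+1)
        push_neg at hgtD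
        have hcondD : c * 10 ^ D + 10 ^ D ≤ p + 1 := by
          by_cases hqq : p / 10 ^ D = c
          · have hs2 : ¬ (s + 1 < 10 ^ D) := fun hs => hmain ⟨hqq, hs⟩
            have hps : p = c * 10 ^ D + s := by
              conv_lhs => rw [← Nat.div_add_mod p (10 ^ D)]
              rw [hqq, ← hsdef]
              ring
            omega
          · have hqc : c ≤ p / 10 ^ D := (Nat.le_div_iff_mul_le (by positivity)).mpr hgtD
            have hq1 : c + 1 ≤ p / 10 ^ D := by omega
            have h2 : (c + 1) * 10 ^ D ≤ (p / 10 ^ D) * 10 ^ D := Nat.mul_le_mul_right _ hq1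
            have h3 : (p / 10 ^ D) * 10 ^ D ≤ p := Nat.div_mul_le_self p _
            calc c * 10 ^ D + 10 ^ D = (c + 1) * 10 ^ D := by ring
              _ ≤ (p / 10 ^ D) * 10 ^ D := h2
              _ ≤ p := h3
              _ ≤ p + 1 := by omega
        have hkbig : p < c * 10 ^ (D + 1) := by
          have h1 : p < 10 ^ (Lc + D) := by rw [← hLpeq]; exact hphi
          have h2 : (10:Nat) ^ (Lc + D) = 10 ^ (Lc - 1) * 10 ^ (D + 1) := by
            rw [← pow_add]
            congr 1
            omega
          have h3 : (10:Nat) ^ (Lc - 1) * 10 ^ (D + 1) ≤ c * 10 ^ (D + 1) :=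
            Nat.mul_le_mul_right _ hclo
          omega
        have hkbigI : prev < cur * (10:Int) ^ (D + 1) := by
          have h1 : ((p : Nat) : Int) < ((c * 10 ^ (D + 1) : Nat) : Int) := by
            exact_mod_cast hkbig
          rw [hpI, hcI]
          push_cast at h1 ⊢
          linarith
        have hone1 : (1:Int) ≤ (10:Int) ^ (D + 1) := one_le_pow₀ (by norm_num)
        have hnkD1 : ¬ (cur * (10:Int) ^ (D + 1) + 10 ^ (D + 1) - 1 ≤ prev) := by
          intro hcond
          linarith
        have hcondDI : cur * (10:Int) ^ D + 10 ^ D - 1 ≤ prev := by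
          have hNI : ((c * 10 ^ D + 10 ^ D : Nat) : Int) ≤ ((p : Nat) : Int) + 1 := by
            exact_mod_cast hcondD
          push_cast at hNI
          rw [hpI, hcI]
          linarith
        have hdD : searchD prev cur 1 = D + 1 := by
          refine searchD_eq prev cur (D + 1) (by omega) hnkD1 D 1 (by omega) ?_
          intro e he1 he2
          by_cases heD : e = D
          · subst heD; exact hcondDI
          · exact hIchain e he1 (by omega)
        have hwh : awhile prev cur ret = (cur * 10 ^ (D + 1), ret + ((D + 1 : Nat) : Int)) := by
          refine awhile_eq (D + 1) prev cur ret (by omega) hcur ?_ hkbigI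
          intro e he
          by_cases he0 : e = 0
          · subst he0; simpa using hle
          · by_cases heD : e = D
            · subst heD
              have hNI : ((c * 10 ^ D : Nat) : Int) ≤ ((p : Nat) : Int) := by
                exact_mod_cast hgtD
              rw [hpI, hcI]
              push_cast at hNI ⊢
              linarith
            · have hNI : ((c * 10 ^ e + 10 ^ e : Nat) : Int) ≤ ((p : Nat) : Int) := by
                exact_mod_cast hchain e (by omega)
              push_cast at hNI
              have hpe : (0:Int) ≤ (10:Int) ^ e := by positivity
              rw [hpI, hcI]
              linarith
        rw [hwh, hdD]
        have hmax : max (cur * (10:Int) ^ (D + 1)) (prev + 1) = cur * 10 ^ (D + 1) :=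
          max_eq_left (by linarith)
        rw [hmax]

-- ---- the folds agree ----

theorem loopA_eq (xs : List Int) (ret : Int) (i : Int) (prev cur : Int)
    (h1 : PySem.List.pyGet? xs (i - 1) = some prev)
    (h2 : PySem.List.pyGet? xs i = some cur) :
    loopA (xs, ret) i = if prev < cur then (xs, ret)
      else (PySem.List.pySetD xs i (stepA prev cur ret).1, (stepA prev cur ret).2) := by
  unfold loopA
  rw [h1, h2]

theorem loopB_eq (xs : List Int) (ret : Int) (i : Int) (prev cur : Int)
    (h1 : PySem.List.pyGet? xs (i - 1) = some prev)
    (h2 : PySem.List.pyGet? xs i = some cur) :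
    loopB (xs, ret) i = if prev < cur then (xs, ret)
      else (PySem.List.pySetD xs i (stepB prev cur ret).1, (stepB prev cur ret).2) := by
  unfold loopB
  rw [h1, h2]

theorem fold_eq (N : Int) : ∀ (m : Nat) (i : Nat) (xs : List Int) (ret : Int),
    1 ≤ i → (N - i).toNat = m → N ≤ (xs.length : Int) →
    (∀ j : Nat, i ≤ j → (j : Int) < N →
      (xs.getD (j - 1) 0 < xs.getD j 0 ∨ (1 ≤ xs.getD (j - 1) 0 ∧ 1 ≤ xs.getD j 0))) →
    (PySem.List.pyRange (i : Int) N 1).foldl loopA (xs, ret)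
      = (PySem.List.pyRange (i : Int) N 1).foldl loopB (xs, ret) := by
  intro m
  induction m with
  | zero =>
    intro i xs ret h1 hm hlen _
    rw [PySem.List.pyRange_one_eq_nil (by omega)]
    rfl
  | succ m ih =>
    intro i xs ret h1 hm hlen hinv
    have hiN : (i : Int) < N := by omega
    rw [PySem.List.pyRange_one_cons hiN]
    simp only [List.foldl_cons]
    have hilen : i < xs.length := by omega
    have hi1len : i - 1 < xs.length := by omega
    have hi1 : ((i : Nat) : Int) - 1 = ((i - 1 : Nat) : Int) := by omega
    have hget1 : PySem.List.pyGet? xs (((i : Nat) : Int) - 1) = some (xs.getD (i - 1) 0) := by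
      rw [hi1, PySem.List.pyGet?_natCast, List.getElem?_eq_getElem hi1len]
      rw [List.getD_eq_getElem xs 0 hi1len]
    have hget2 : PySem.List.pyGet? xs ((i : Nat) : Int) = some (xs.getD i 0) := by
      rw [PySem.List.pyGet?_natCast, List.getElem?_eq_getElem hilen]
      rw [List.getD_eq_getElem xs 0 hilen]
    set prev := xs.getD (i - 1) 0 with hprevdef
    set cur := xs.getD i 0 with hcurdef
    have hcast : ((i : Nat) : Int) + 1 = ((i + 1 : Nat) : Int) := by omega
    rw [loopA_eq xs ret _ prev cur hget1 hget2, loopB_eq xs ret _ prev cur hget1 hget2]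
    by_cases hpc : prev < cur
    · rw [if_pos hpc, if_pos hpc, hcast]
      exact ih (i + 1) xs ret (by omega) (by omega) hlen
        (fun j hj hjN => hinv j (by omega) hjN)
    · rw [if_neg hpc, if_neg hpc]
      have hpair := hinv i (le_refl i) hiN
      have hpos : 1 ≤ cur ∧ 1 ≤ prev := by
        rcases hpair with h | h
        · exact absurd h hpc
        · exact ⟨h.2, h.1⟩
      rw [stepAB prev cur ret hpos.1 (by omega)]
      set v := (stepB prev cur ret).1 with hvdef
      have hv : prev + 1 ≤ v := by
        rw [hvdef]
        unfold stepB
        exact le_max_right _ _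
      rw [PySem.List.pySetD_natCast, hcast]
      have hgdne : ∀ t : Nat, t ≠ i → (xs.set i v).getD t 0 = xs.getD t 0 := by
        intro t ht
        rw [List.getD_eq_getElem?_getD, List.getElem?_set_ne (by omega),
          ← List.getD_eq_getElem?_getD]
      have hgdi : (xs.set i v).getD i 0 = v := by
        rw [List.getD_eq_getElem?_getD, List.getElem?_set_self hilen]
        rfl
      refine ih (i + 1) (xs.set i v) (stepB prev cur ret).2 (by omega) (by omega)
        (by simp; omega) ?_
      intro j hj hjN
      by_cases hji : j = i + 1
      · subst hji
        rw [show i + 1 - 1 = i by omega, hgdi, hgdne (i + 1) (by omega)]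
        by_cases hnext : 1 ≤ xs.getD (i + 1) 0
        · right
          exact ⟨by omega, hnext⟩
        · exfalso
          have hold := hinv (i + 1) (by omega) hjN
          rw [show i + 1 - 1 = i by omega] at hold
          rcases hold with h | h
          · omega
          · omega
      · rw [hgdne (j - 1) (by omega), hgdne j (by omega)]
        exact hinv j (by omega) hjN

-- ===== VERDICT =====
theorem solution_spec : Claim_equal_solution := by
  unfold Claim_equal_solution
  intro N X _ hpre
  unfold Spec_solution solution solution_alt
  by_cases hN : N ≤ 1
  · rw [PySem.List.pyRange_one_eq_nil hN]
    rfl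
  · obtain ⟨hlen, hinv⟩ := hpre
    have hlen' : N ≤ (X.length : Int) := by
      rcases hlen with h | h
      · exact h
      · omega
    have := fold_eq N (N - 1).toNat 1 X 0 (le_refl 1) (by norm_num) hlen'
      (fun j hj hjN => hinv j (by omega) hj)
    simpa using congrArg Prod.snd this
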